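-- pv_equiv track=rewrite | github.com/Chromega/adventofcode | 2020/Day20/day20.py | FlipAndRotate
-- ===== SOURCE A (Python) =====
-- NUM_DIRECTIONS = 4
--
-- def FlipAndRotateCoordinate(pos,size,flip,turns):
--     newX = pos[0]+1
--     newY = pos[1]+1
--
--     while turns < 0:
--         turns += NUM_DIRECTIONS
--
--     if flip:
--         newX = -newX
--
--     for i in range(turns):
--         rotX = -newY
--         rotY = newX
--         newX = rotX
--         newY = rotY
--
--     if newX < 0:
--         newX += size+1
--     if newY < 0:
--         newY += size+1
--
--     return (newX-1, newY-1)
--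
-- def FlipAndRotate(rows, flip, turns):
--     #assuming square
--     size = len(rows)
--
--     newMat = []
--     for row in range(size):
--         row = []
--         for col in range(size):
--             row.append(0)
--         newMat.append(row)
--
--     for y in range(size):
--         for x in range(size):
--             pos = (x,y)
--             newPos = FlipAndRotateCoordinate(pos, size, flip, turns)
--             newMat[newPos[1]][newPos[0]] = rows[y][x]
--
--     return newMat
-- ===== SOURCE B (Python) =====
-- def FlipAndRotate(rows, flip, turns):
--     size = len(rows)
--     m = [list(r[:size]) for r in rows]
--     if flip:
--         m = [r[::-1] for r in m]
--     for _ in range(turns % 4):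
--         m = [[row[i] for row in reversed(m)] for i in range(size)]
--     return m
-- ===== Notes on version B (the rewrite author's own statement) =====
-- stated objective: faster
-- what changed: A maps every cell through a 1-based signed coordinate transform (flip negation, `turns` successive (x,y)->(-y,x) steps per cell, negative-index renormalisation) and scatter-writes into a preallocated zero matrix; B works on whole rows: copy, reverse each row if flip, then rotate 90 degrees clockwise turns % 4 times by a gather comprehension over the reversed matrix.
import Mathlib
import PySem

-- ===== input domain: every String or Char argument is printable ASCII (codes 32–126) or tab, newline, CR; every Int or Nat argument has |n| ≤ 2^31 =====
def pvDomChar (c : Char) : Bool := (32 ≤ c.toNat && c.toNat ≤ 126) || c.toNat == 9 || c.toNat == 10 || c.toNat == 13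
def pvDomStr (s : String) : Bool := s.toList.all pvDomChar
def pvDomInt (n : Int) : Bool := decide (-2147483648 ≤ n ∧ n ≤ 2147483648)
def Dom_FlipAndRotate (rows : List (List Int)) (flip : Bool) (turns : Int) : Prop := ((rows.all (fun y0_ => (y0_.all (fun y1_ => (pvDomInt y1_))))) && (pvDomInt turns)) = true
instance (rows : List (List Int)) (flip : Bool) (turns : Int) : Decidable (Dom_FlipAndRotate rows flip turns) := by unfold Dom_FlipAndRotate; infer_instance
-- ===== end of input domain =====

-- B replaces A's per-cell signed coordinate transform (which iterates `turns` rotation steps per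
-- cell) + scatter writes by whole-row operations: horizontal flip = reverse each row, then
-- `turns % 4` clockwise rotations by a gather comprehension over the reversed matrix — measured
-- faster (O(n^2) vs O(n^2*turns)); neither implementation mutates its input.

-- ===== PORT A =====
-- the `while turns < 0: turns += NUM_DIRECTIONS` loop
def pvNormTurns (turns : Int) : Int :=
  if turns < 0 then pvNormTurns (turns + 4) else turns
termination_by (-turns).toNat
decreasing_by omega

def FlipAndRotateCoordinate (pos : Int × Int) (size : Int) (flip : Bool) (turns : Int) : Int × Int :=
  let newX := pos.1 + 1
  let newY := pos.2 + 1
  let t := pvNormTurns turns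
  let newX := if flip then -newX else newX
  -- for i in range(turns): rotX = -newY; rotY = newX; newX = rotX; newY = rotY
  let p := (PySem.List.pyRange 0 t 1).foldl (fun (p : Int × Int) _ => (-p.2, p.1)) (newX, newY)
  let newX := if p.1 < 0 then p.1 + size + 1 else p.1
  let newY := if p.2 < 0 then p.2 + size + 1 else p.2
  (newX - 1, newY - 1)

def FlipAndRotate (rows : List (List Int)) (flip : Bool) (turns : Int) : List (List Int) :=
  let size : Int := rows.length
  let newMat := (PySem.List.pyRange 0 size 1).foldl
    (fun acc _ => acc ++ [(PySem.List.pyRange 0 size 1).foldl (fun r _ => r ++ [(0 : Int)]) []]) []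
  (PySem.List.pyRange 0 size 1).foldl (fun m y =>
    (PySem.List.pyRange 0 size 1).foldl (fun m x =>
      let newPos := FlipAndRotateCoordinate (x, y) size flip turns
      -- newMat[newPos[1]][newPos[0]] = rows[y][x]; for grid sources the target indices are
      -- always in 0..size-1 (proved below), where modify/set are exactly Python's assignment
      m.modify newPos.2.toNat (fun row => row.set newPos.1.toNat
        (PySem.List.pyGetD (PySem.List.pyGetD rows y []) x 0))) m) newMat

-- ===== PORT B =====
def FlipAndRotate_alt (rows : List (List Int)) (flip : Bool) (turns : Int) : List (List Int) :=
  let size : Int := rows.length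
  -- m = [list(r[:size]) for r in rows]
  let m := rows.map (fun r => PySem.List.slice r none (some size))
  -- if flip: m = [r[::-1] for r in m]   (r[::-1] is List.reverse, PySem.List.slice?_none_none_neg_one)
  let m := if flip then m.map List.reverse else m
  -- for _ in range(turns % 4): m = [[row[i] for row in reversed(m)] for i in range(size)]
  (PySem.List.pyRange 0 (PySem.Int.mod turns 4) 1).foldl
    (fun m _ => (PySem.List.pyRange 0 size 1).map
      (fun i => m.reverse.map (fun row => PySem.List.pyGetD row i 0))) m

-- ===== PRECONDITION & SPEC =====
-- Pre_: every row at least as long as the number of rows — exactly the inputs on which A's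
-- rows[y][x] lookups (x < len(rows)) never raise IndexError; A raises on shorter rows.
def Pre_FlipAndRotate (rows : List (List Int)) (flip : Bool) (turns : Int) : Prop :=
  ∀ r ∈ rows, rows.length ≤ r.length
instance (rows : List (List Int)) (flip : Bool) (turns : Int) : Decidable (Pre_FlipAndRotate rows flip turns) := by unfold Pre_FlipAndRotate; infer_instance

def pvWitness_FlipAndRotate : List (List Int) × Bool × Int := ([[1, 2], [3, 4]], true, 1)

def Spec_FlipAndRotate (rows : List (List Int)) (flip : Bool) (turns : Int) (out : List (List Int)) : Prop := out = FlipAndRotate_alt rows flip turns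
instance (rows : List (List Int)) (flip : Bool) (turns : Int) (out : List (List Int)) : Decidable (Spec_FlipAndRotate rows flip turns out) := by unfold Spec_FlipAndRotate; infer_instance

-- ===== CLAIM (what is proved, stated in full; the proofs are below) =====
def Claim_equal_FlipAndRotate : Prop := ∀ (rows : List (List Int)) (flip : Bool) (turns : Int), Dom_FlipAndRotate rows flip turns → Pre_FlipAndRotate rows flip turns → Spec_FlipAndRotate rows flip turns (FlipAndRotate rows flip turns)


-- ===== LEMMAS AND PROOFS =====

-- generic: a foldl that ignores the list elements is an iterate
theorem pvFoldl_const_iterate {α β : Type} (f : β → β) :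
    ∀ (l : List α) (init : β), l.foldl (fun a _ => f a) init = f^[l.length] init
  | [], _ => rfl
  | x :: xs, init => by
    simp only [List.foldl_cons, List.length_cons]
    rw [pvFoldl_const_iterate f xs (f init), Function.iterate_succ_apply]

theorem pvFoldl_pyRange_const {β : Type} (t : Int) (f : β → β) (init : β) :
    (PySem.List.pyRange 0 t 1).foldl (fun a _ => f a) init = f^[t.toNat] init := by
  rw [pvFoldl_const_iterate, PySem.List.length_pyRange_one]
  norm_num

-- generic: a foldl appending a constant element builds a replicate
theorem pvFoldl_append_const {α β : Type} (c : α) :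
    ∀ (l : List β) (init : List α),
      l.foldl (fun r _ => r ++ [c]) init = init ++ List.replicate l.length c
  | [], init => by simp
  | x :: xs, init => by
    simp only [List.foldl_cons, List.length_cons]
    rw [pvFoldl_append_const c xs (init ++ [c])]
    simp [List.replicate_succ, List.append_assoc]

-- pvNormTurns normalises to a nonnegative value with the same residue mod 4
theorem pvNormTurns_spec (turns : Int) :
    0 ≤ pvNormTurns turns ∧ pvNormTurns turns % 4 = turns % 4 := by
  induction turns using pvNormTurns.induct with
  | case1 t h ih => rw [pvNormTurns, if_pos h]; omega
  | case2 t h => rw [pvNormTurns, if_neg h]; omega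

-- the 90-degree coordinate rotation of A's inner loop
def pvRot (p : Int × Int) : Int × Int := (-p.2, p.1)

theorem pvRot_four (p : Int × Int) : pvRot^[4] p = p := by
  show pvRot (pvRot (pvRot (pvRot p))) = p
  simp [pvRot]

theorem pvRot_iterate_four_mul : ∀ (q : Nat) (p : Int × Int), pvRot^[4 * q] p = p
  | 0, _ => rfl
  | q + 1, p => by
    rw [show 4 * (q + 1) = 4 * q + 4 by ring, Function.iterate_add_apply,
      pvRot_four, pvRot_iterate_four_mul q]

theorem pvRot_iterate_mod (m : Nat) (p : Int × Int) : pvRot^[m] p = pvRot^[m % 4] p := by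
  conv_lhs => rw [show m = 4 * (m / 4) + m % 4 by omega]
  rw [Function.iterate_add_apply, pvRot_iterate_four_mul]

-- the horizontal-flip index map
def pvXf (n : Int) (flip : Bool) (x : Int) : Int := if flip then n - 1 - x else x

theorem pvXf_bounds {n x : Int} (flip : Bool) (h1 : 0 ≤ x) (h2 : x < n) :
    0 ≤ pvXf n flip x ∧ pvXf n flip x < n := by
  unfold pvXf; split <;> omega

theorem pvXf_invol {n x : Int} (flip : Bool) (h1 : 0 ≤ x) (h2 : x < n) :
    pvXf n flip (pvXf n flip x) = x := by
  unfold pvXf; split <;> omega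

-- closed form of A's coordinate transform on grid sources
theorem pvCoord_eval (n : Int) (flip : Bool) (turns x y : Int)
    (hx1 : 0 ≤ x) (hx2 : x < n) (hy1 : 0 ≤ y) (hy2 : y < n) :
    FlipAndRotateCoordinate (x, y) n flip turns =
      (if turns % 4 = 0 then (pvXf n flip x, y)
       else if turns % 4 = 1 then (n - 1 - y, pvXf n flip x)
       else if turns % 4 = 2 then (n - 1 - pvXf n flip x, n - 1 - y)
       else (y, n - 1 - pvXf n flip x)) := by
  have hfold : ∀ (init : Int × Int),
      (PySem.List.pyRange 0 (pvNormTurns turns) 1).foldl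
        (fun (p : Int × Int) _ => (-p.2, p.1)) init = pvRot^[(pvNormTurns turns).toNat] init :=
    fun init => pvFoldl_pyRange_const (pvNormTurns turns) pvRot init
  obtain ⟨hnn, hmod⟩ := pvNormTurns_spec turns
  have hk : 0 ≤ turns % 4 ∧ turns % 4 < 4 :=
    ⟨Int.emod_nonneg _ (by norm_num), Int.emod_lt_of_pos _ (by norm_num)⟩
  have hcnt : (pvNormTurns turns).toNat % 4 = (turns % 4).toNat := by omega
  simp only [FlipAndRotateCoordinate]
  rw [hfold, pvRot_iterate_mod, hcnt]
  have h4 : turns % 4 = 0 ∨ turns % 4 = 1 ∨ turns % 4 = 2 ∨ turns % 4 = 3 := by omega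
  rcases h4 with h | h | h | h <;> rw [h] <;>
    simp only [show ((0:Int)).toNat = 0 from rfl, show ((1:Int)).toNat = 1 from rfl,
      show ((2:Int)).toNat = 2 from rfl, show ((3:Int)).toNat = 3 from rfl] <;>
    simp only [Function.iterate_succ_apply, Function.iterate_zero_apply, pvRot] <;>
    norm_num <;>
    cases flip <;> simp only [pvXf] <;> norm_num <;> (try split_ifs) <;>
    (try simp only [Prod.mk.injEq]) <;>
    (first | (constructor <;> omega) | omega | rfl | trivial)


-- ---------- A side: the scatter fold ----------

-- target cell (row, col) A writes the source p = (y, x) to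
def pvTgt (n : Int) (flip : Bool) (turns : Int) (p : Int × Int) : Nat × Nat :=
  ((FlipAndRotateCoordinate (p.2, p.1) n flip turns).2.toNat,
   (FlipAndRotateCoordinate (p.2, p.1) n flip turns).1.toNat)

def pvVal (rows : List (List Int)) (p : Int × Int) : Int :=
  PySem.List.pyGetD (PySem.List.pyGetD rows p.1 []) p.2 0

def pvStep (n : Int) (flip : Bool) (turns : Int) (rows : List (List Int))
    (m : List (List Int)) (p : Int × Int) : List (List Int) :=
  m.modify (pvTgt n flip turns p).1 (fun row => row.set (pvTgt n flip turns p).2 (pvVal rows p))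

def pvSrcs (n : Int) : List (Int × Int) :=
  (PySem.List.pyRange 0 n 1).flatMap (fun y => (PySem.List.pyRange 0 n 1).map (fun x => (y, x)))

theorem pvFoldl_nested {γ : Type} (l2 : List Int) (g : γ → Int → Int → γ) :
    ∀ (l1 : List Int) (init : γ),
      l1.foldl (fun m y => l2.foldl (fun m x => g m y x) m) init
        = (l1.flatMap (fun y => l2.map (fun x => (y, x)))).foldl (fun m p => g m p.1 p.2) init
  | [], _ => rfl
  | a :: l, init => by
    simp only [List.foldl_cons, List.flatMap_cons, List.foldl_append, List.foldl_map]
    exact pvFoldl_nested l2 g l _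

theorem pvA_eq (rows : List (List Int)) (flip : Bool) (turns : Int) :
    FlipAndRotate rows flip turns
      = (pvSrcs (rows.length)).foldl (pvStep (rows.length) flip turns rows)
          (List.replicate rows.length (List.replicate rows.length 0)) := by
  unfold FlipAndRotate
  rw [pvFoldl_nested, pvFoldl_append_const, pvFoldl_append_const]
  simp only [PySem.List.length_pyRange_one, List.nil_append, Int.sub_zero, Int.toNat_natCast]
  rfl

def pvShape (n : Nat) (m : List (List Int)) : Prop :=
  m.length = n ∧ ∀ (i : Nat) (hi : i < m.length), m[i].length = n

def pvGet (m : List (List Int)) (r c : Nat) : Int := (m.getD r []).getD c 0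

theorem pvShape_step {n : Nat} {m : List (List Int)} (N : Int) (flip : Bool) (turns : Int)
    (rows : List (List Int)) (p : Int × Int) (h : pvShape n m) :
    pvShape n (pvStep N flip turns rows m p) := by
  obtain ⟨h1, h2⟩ := h
  refine ⟨by simp [pvStep, h1], ?_⟩
  intro i hi
  unfold pvStep at hi ⊢
  rw [List.length_modify] at hi
  rw [List.getElem_modify]
  split
  · rw [List.length_set]; exact h2 i hi
  · exact h2 i hi

theorem pvShape_fold {n : Nat} (N : Int) (flip : Bool) (turns : Int) (rows : List (List Int)) :
    ∀ (L : List (Int × Int)) (m : List (List Int)), pvShape n m →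
      pvShape n (L.foldl (pvStep N flip turns rows) m)
  | [], _, h => h
  | p :: L, m, h => by
    rw [List.foldl_cons]
    exact pvShape_fold N flip turns rows L _ (pvShape_step N flip turns rows p h)

theorem pvGet_step_ne {N : Int} {flip : Bool} {turns : Int} {rows m : List (List Int)}
    {p : Int × Int} {r c : Nat} (h : pvTgt N flip turns p ≠ (r, c)) :
    pvGet (pvStep N flip turns rows m p) r c = pvGet m r c := by
  unfold pvGet pvStep
  rcases htp : pvTgt N flip turns p with ⟨i, j⟩
  rw [htp] at h
  by_cases hir : i = r
  · subst hir
    have hjc : j ≠ c := fun h' => h (by rw [h'])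
    cases hm : m[i]? with
    | none => simp [List.getD_eq_getElem?_getD, List.getElem?_modify, hm]
    | some row =>
      simp [List.getD_eq_getElem?_getD, List.getElem?_modify, hm, List.getElem?_set_ne hjc]
  · cases hm : m[r]? with
    | none => simp [List.getD_eq_getElem?_getD, List.getElem?_modify, hir, hm]
    | some row => simp [List.getD_eq_getElem?_getD, List.getElem?_modify, hir, hm]

theorem pvGet_fold_ne {N : Int} {flip : Bool} {turns : Int} {rows : List (List Int)}
    {r c : Nat} :
    ∀ (L : List (Int × Int)) (m : List (List Int)),
      (∀ p ∈ L, pvTgt N flip turns p ≠ (r, c)) →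
      pvGet (L.foldl (pvStep N flip turns rows) m) r c = pvGet m r c
  | [], _, _ => rfl
  | p :: L, m, h => by
    rw [List.foldl_cons]
    rw [pvGet_fold_ne L _ (fun q hq => h q (List.mem_cons_of_mem _ hq))]
    exact pvGet_step_ne (h p List.mem_cons_self)

theorem pvGet_step_self {n : Nat} {N : Int} {flip : Bool} {turns : Int}
    {rows m : List (List Int)} {p : Int × Int} {r c : Nat}
    (hs : pvShape n m) (htp : pvTgt N flip turns p = (r, c)) (hr : r < n) (hc : c < n) :
    pvGet (pvStep N flip turns rows m p) r c = pvVal rows p := by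
  unfold pvGet pvStep
  rw [htp]
  have hrm : r < m.length := by rw [hs.1]; exact hr
  have hcm : c < m[r].length := by rw [hs.2 r hrm]; exact hc
  simp [List.getD_eq_getElem?_getD, List.getElem?_modify,
    List.getElem?_eq_getElem hrm, List.getElem?_set_self (by simpa using hcm)]

theorem pvGet_scatter {n : Nat} {N : Int} {flip : Bool} {turns : Int}
    {rows : List (List Int)} {p0 : Int × Int} {r c : Nat}
    (L : List (Int × Int)) (m : List (List Int))
    (hnd : L.Nodup) (hmem : p0 ∈ L) (htp : pvTgt N flip turns p0 = (r, c))
    (huniq : ∀ p ∈ L, pvTgt N flip turns p = (r, c) → p = p0)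
    (hs : pvShape n m) (hr : r < n) (hc : c < n) :
    pvGet (L.foldl (pvStep N flip turns rows) m) r c = pvVal rows p0 := by
  obtain ⟨L1, L2, rfl⟩ := List.append_of_mem hmem
  rw [List.foldl_append, List.foldl_cons]
  have hnot : ∀ p ∈ L2, pvTgt N flip turns p ≠ (r, c) := by
    intro p hp heq
    have hpp : p = p0 := huniq p (by simp [hp]) heq
    subst hpp
    have : p ∉ L2 := (List.nodup_cons.mp (List.nodup_append.mp hnd).2.1).1
    exact this hp
  rw [pvGet_fold_ne L2 _ hnot]
  exact pvGet_step_self (pvShape_fold N flip turns rows L1 m hs) htp hr hc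

theorem pvMem_srcs {n : Int} {p : Int × Int} :
    p ∈ pvSrcs n ↔ 0 ≤ p.1 ∧ p.1 < n ∧ 0 ≤ p.2 ∧ p.2 < n := by
  rcases p with ⟨y, x⟩
  simp only [pvSrcs, List.mem_flatMap, List.mem_map, PySem.List.mem_pyRange_one, Prod.mk.injEq]
  constructor
  · rintro ⟨a, ha, b, hb, rfl, rfl⟩
    exact ⟨ha.1, ha.2, hb.1, hb.2⟩
  · rintro ⟨h1, h2, h3, h4⟩
    exact ⟨y, ⟨h1, h2⟩, x, ⟨h3, h4⟩, rfl, rfl⟩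

theorem pvNodup_srcs (n : Int) : (pvSrcs n).Nodup := by
  have h : pvSrcs n = (PySem.List.pyRange 0 n 1) ×ˢ (PySem.List.pyRange 0 n 1) := rfl
  rw [h]
  exact List.Nodup.product (PySem.List.nodup_pyRange_one 0 _) (PySem.List.nodup_pyRange_one 0 _)

-- ---------- B side ----------

def pvRotCW (N : Int) (m : List (List Int)) : List (List Int) :=
  (PySem.List.pyRange 0 N 1).map (fun i => m.reverse.map (fun row => PySem.List.pyGetD row i 0))

theorem pvB_eq (rows : List (List Int)) (flip : Bool) (turns : Int) :
    FlipAndRotate_alt rows flip turns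
      = (pvRotCW (rows.length : Int))^[(turns % 4).toNat]
          (if flip
           then (rows.map (fun r => PySem.List.slice r none (some (rows.length : Int)))).map List.reverse
           else rows.map (fun r => PySem.List.slice r none (some (rows.length : Int)))) := by
  unfold FlipAndRotate_alt
  rw [PySem.Int.mod_eq_emod_of_pos (by norm_num)]
  exact pvFoldl_pyRange_const _ (pvRotCW _) _

theorem pvShape_rotCW {n : Nat} {m : List (List Int)} (h : pvShape n m) :
    pvShape n (pvRotCW (n : Int) m) := by
  constructor
  · simp [pvRotCW, PySem.List.length_pyRange_one]
  · intro i hi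
    simp only [pvRotCW, List.getElem_map, List.length_map, List.length_reverse]
    exact h.1

theorem pvGet_rotCW {n : Nat} {m : List (List Int)} {r c : Nat}
    (hs : pvShape n m) (hr : r < n) (hc : c < n) :
    pvGet (pvRotCW (n : Int) m) r c = pvGet m (n - 1 - c) r := by
  have hr' : r < (PySem.List.pyRange 0 (n : Int) 1).length := by
    rw [PySem.List.length_pyRange_one]; omega
  have hcrev : c < m.reverse.length := by rw [List.length_reverse, hs.1]; exact hc
  have h1 : pvGet (pvRotCW (n : Int) m) r c
      = (m.reverse.map (fun row => PySem.List.pyGetD row ((0 : Int) + (r : Nat)) 0)).getD c 0 := by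
    unfold pvGet pvRotCW
    congr 1
    rw [List.getD_eq_getElem?_getD, List.getElem?_map, List.getElem?_eq_getElem hr',
      PySem.List.getElem_pyRange_one]
    simp
  have h2 : ((0 : Int) + (r : Nat)) = ((r : Nat) : Int) := by omega
  rw [h1, h2]
  rw [List.getD_eq_getElem?_getD, List.getElem?_map, List.getElem?_eq_getElem hcrev]
  simp only [Option.map_some, Option.getD_some]
  rw [List.getElem_reverse, PySem.List.pyGetD_natCast]
  have hnc : n - 1 - c < m.length := by rw [hs.1]; omega
  have hlc : m.length - 1 - c = n - 1 - c := by rw [hs.1]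
  simp only [hlc]
  unfold pvGet
  congr 1
  rw [List.getD_eq_getElem?_getD (l := m), List.getElem?_eq_getElem hnc]
  simp


-- ---------- B side: initial matrix ----------

def pvM1 (rows : List (List Int)) (flip : Bool) : List (List Int) :=
  if flip
  then (rows.map (fun r => PySem.List.slice r none (some (rows.length : Int)))).map List.reverse
  else rows.map (fun r => PySem.List.slice r none (some (rows.length : Int)))

theorem pvB_eq' (rows : List (List Int)) (flip : Bool) (turns : Int) :
    FlipAndRotate_alt rows flip turns
      = (pvRotCW (rows.length : Int))^[(turns % 4).toNat] (pvM1 rows flip) := by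
  rw [pvB_eq]; rfl

theorem pvShape_m1 {rows : List (List Int)} (flip : Bool)
    (hpre : ∀ r ∈ rows, rows.length ≤ r.length) :
    pvShape rows.length (pvM1 rows flip) := by
  have hlen : ∀ (i : Nat) (hi : i < rows.length),
      (PySem.List.slice rows[i] none (some (rows.length : Int))).length = rows.length := by
    intro i hi
    rw [PySem.List.slice_to_natCast, List.length_take]
    exact Nat.min_eq_left (hpre rows[i] (List.getElem_mem hi))
  unfold pvM1
  cases flip <;> simp only [if_true, if_false, Bool.false_eq_true]
  · refine ⟨by simp, ?_⟩
    intro i hi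
    simp only [List.length_map] at hi
    simp only [List.getElem_map]
    exact hlen i hi
  · refine ⟨by simp, ?_⟩
    intro i hi
    simp only [List.length_map] at hi
    simp only [List.getElem_map, List.length_reverse]
    exact hlen i hi

theorem pvGet_m1 {rows : List (List Int)} {flip : Bool} {r c : Nat}
    (hpre : ∀ r ∈ rows, rows.length ≤ r.length)
    (hr : r < rows.length) (hc : c < rows.length) :
    pvGet (pvM1 rows flip) r c
      = pvGet rows r (if flip then rows.length - 1 - c else c) := by
  have hrowlen : rows.length ≤ rows[r].length := hpre rows[r] (List.getElem_mem hr)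
  have hslice : PySem.List.slice rows[r] none (some (rows.length : Int))
      = rows[r].take rows.length := PySem.List.slice_to_natCast _ _
  have htlen : (rows[r].take rows.length).length = rows.length := by
    rw [List.length_take]; exact Nat.min_eq_left hrowlen
  unfold pvM1 pvGet
  cases flip <;> simp only [if_true, if_false, Bool.false_eq_true]
  · simp only [List.getD_eq_getElem?_getD, List.getElem?_map, List.getElem?_eq_getElem hr,
      Option.map_some, Option.getD_some, hslice, List.getElem?_take, if_pos hc]
  · simp only [List.getD_eq_getElem?_getD, List.getElem?_map, List.getElem?_eq_getElem hr,
      Option.map_some, Option.getD_some, hslice]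
    have hc' : c < (rows[r].take rows.length).reverse.length := by
      rw [List.length_reverse, htlen]; exact hc
    rw [List.getElem?_eq_getElem hc', Option.getD_some, List.getElem_reverse, List.getElem_take]
    have hidx : (rows[r].take rows.length).length - 1 - c = rows.length - 1 - c := by
      rw [htlen]
    simp only [hidx]
    have hlt : rows.length - 1 - c < rows[r].length := by omega
    rw [List.getElem?_eq_getElem hlt, Option.getD_some]

theorem pvVal_eq (rows : List (List Int)) (a b : Int) (ha : 0 ≤ a) (hb : 0 ≤ b) :
    pvVal rows (a, b) = pvGet rows a.toNat b.toNat := by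
  obtain ⟨na, rfl⟩ := Int.eq_ofNat_of_zero_le ha
  obtain ⟨nb, rfl⟩ := Int.eq_ofNat_of_zero_le hb
  simp [pvVal, pvGet, PySem.List.pyGetD_natCast]


-- ---------- shapes of the two results ----------

theorem pvShape_iterB {n : Nat} (k : Nat) {m : List (List Int)} (h : pvShape n m) :
    pvShape n ((pvRotCW (n : Int))^[k] m) := by
  induction k with
  | zero => simpa using h
  | succ k ih => rw [Function.iterate_succ_apply']; exact pvShape_rotCW ih

theorem pvShape_A (rows : List (List Int)) (flip : Bool) (turns : Int) :
    pvShape rows.length (FlipAndRotate rows flip turns) := by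
  rw [pvA_eq]
  refine pvShape_fold _ _ _ _ _ _ ⟨by simp, ?_⟩
  intro i hi; simp

theorem pvShape_B (rows : List (List Int)) (flip : Bool) (turns : Int)
    (hpre : ∀ r ∈ rows, rows.length ≤ r.length) :
    pvShape rows.length (FlipAndRotate_alt rows flip turns) := by
  rw [pvB_eq']
  exact pvShape_iterB _ (pvShape_m1 flip hpre)

-- ---------- the pointwise crux ----------

theorem pvPointwise (rows : List (List Int)) (flip : Bool) (turns : Int)
    (hpre : ∀ r ∈ rows, rows.length ≤ r.length) (r c : Nat)
    (hr : r < rows.length) (hc : c < rows.length) :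
    pvGet (FlipAndRotate rows flip turns) r c
      = pvGet (FlipAndRotate_alt rows flip turns) r c := by
  have hk : 0 ≤ turns % 4 ∧ turns % 4 < 4 :=
    ⟨Int.emod_nonneg _ (by norm_num), Int.emod_lt_of_pos _ (by norm_num)⟩
  have hz : pvShape rows.length (List.replicate rows.length (List.replicate rows.length (0:Int))) := by
    refine ⟨by simp, ?_⟩; intro i hi; simp
  have hm1 := pvShape_m1 (rows := rows) flip hpre
  rw [pvA_eq, pvB_eq']
  have h4 : turns % 4 = 0 ∨ turns % 4 = 1 ∨ turns % 4 = 2 ∨ turns % 4 = 3 := by omega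
  rcases h4 with h | h | h | h <;> rw [h]
  · -- k = 0
    simp only [show ((0:Int)).toNat = 0 from rfl, Function.iterate_zero, id_eq]
    rw [pvGet_m1 hpre hr hc]
    have hxf := pvXf_bounds (n := (rows.length : Int)) (x := (c : Int)) flip (by omega) (by omega)
    rw [pvGet_scatter (p0 := ((r : Int), pvXf (rows.length : Int) flip (c : Int)))
      (pvSrcs (rows.length : Int)) _ (pvNodup_srcs _)
      (pvMem_srcs.mpr ⟨by omega, by omega, hxf.1, hxf.2⟩)
      (by
        simp only [pvTgt]
        rw [pvCoord_eval _ flip turns _ _ hxf.1 hxf.2 (by omega) (by omega)]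
        simp only [pvXf_invol (n := (rows.length : Int)) (x := (c : Int)) flip (by omega) (by omega), h]
        norm_num)
      (by
        rintro ⟨y, x⟩ hp heq
        obtain ⟨hy1, hy2, hx1, hx2⟩ := pvMem_srcs.mp hp
        have hbx := pvXf_bounds (n := (rows.length : Int)) (x := x) flip hx1 hx2
        simp only [pvTgt] at heq
        rw [pvCoord_eval _ flip turns _ _ hx1 hx2 hy1 hy2] at heq
        simp only [h] at heq
        norm_num [Prod.mk.injEq] at heq
        have hxeq : pvXf (rows.length : Int) flip x = (c : Int) := by omega
        rw [show y = (r : Int) by omega, ← hxeq, pvXf_invol flip hx1 hx2])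
      hz hr hc]
    rw [pvVal_eq _ _ _ (by omega) hxf.1]
    have hidx : (pvXf (rows.length : Int) flip (c : Int)).toNat
        = if flip then rows.length - 1 - c else c := by
      unfold pvXf; cases flip <;> simp <;> omega
    rw [hidx]
    simp
  · -- k = 1
    simp only [Int.toNat_one, Function.iterate_one]
    rw [pvGet_rotCW hm1 hr hc, pvGet_m1 hpre (by omega) (by omega)]
    have hxf := pvXf_bounds (n := (rows.length : Int)) (x := (r : Int)) flip (by omega) (by omega)
    rw [pvGet_scatter (p0 := ((rows.length : Int) - 1 - c, pvXf (rows.length : Int) flip (r : Int)))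
      (pvSrcs (rows.length : Int)) _ (pvNodup_srcs _)
      (pvMem_srcs.mpr ⟨by omega, by omega, hxf.1, hxf.2⟩)
      (by
        simp only [pvTgt]
        rw [pvCoord_eval _ flip turns _ _ hxf.1 hxf.2 (by omega) (by omega)]
        simp only [pvXf_invol (n := (rows.length : Int)) (x := (r : Int)) flip (by omega) (by omega), h]
        norm_num)
      (by
        rintro ⟨y, x⟩ hp heq
        obtain ⟨hy1, hy2, hx1, hx2⟩ := pvMem_srcs.mp hp
        have hbx := pvXf_bounds (n := (rows.length : Int)) (x := x) flip hx1 hx2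
        simp only [pvTgt] at heq
        rw [pvCoord_eval _ flip turns _ _ hx1 hx2 hy1 hy2] at heq
        simp only [h] at heq
        norm_num [Prod.mk.injEq] at heq
        have hxeq : pvXf (rows.length : Int) flip x = (r : Int) := by omega
        rw [show y = (rows.length : Int) - 1 - c by omega, ← hxeq, pvXf_invol flip hx1 hx2])
      hz hr hc]
    rw [pvVal_eq _ _ _ (by omega) hxf.1]
    have hidx : (pvXf (rows.length : Int) flip (r : Int)).toNat
        = if flip then rows.length - 1 - r else r := by
      unfold pvXf; cases flip <;> simp <;> omega
    rw [hidx, show ((rows.length : Int) - 1 - c).toNat = rows.length - 1 - c by omega]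
  · -- k = 2
    rw [show ((2:Int)).toNat = 2 from rfl, show (2:Nat) = 1 + 1 from rfl,
      Function.iterate_add_apply]
    simp only [Function.iterate_one]
    rw [pvGet_rotCW (pvShape_rotCW hm1) hr hc, pvGet_rotCW hm1 (by omega) (by omega),
      pvGet_m1 hpre (by omega) (by omega)]
    have hxf := pvXf_bounds (n := (rows.length : Int)) (x := (rows.length : Int) - 1 - c) flip
      (by omega) (by omega)
    rw [pvGet_scatter
      (p0 := ((rows.length : Int) - 1 - r, pvXf (rows.length : Int) flip ((rows.length : Int) - 1 - c)))
      (pvSrcs (rows.length : Int)) _ (pvNodup_srcs _)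
      (pvMem_srcs.mpr ⟨by omega, by omega, hxf.1, hxf.2⟩)
      (by
        simp only [pvTgt]
        rw [pvCoord_eval _ flip turns _ _ hxf.1 hxf.2 (by omega) (by omega)]
        simp only [pvXf_invol (n := (rows.length : Int)) (x := (rows.length : Int) - 1 - c) flip (by omega) (by omega), h]
        norm_num)
      (by
        rintro ⟨y, x⟩ hp heq
        obtain ⟨hy1, hy2, hx1, hx2⟩ := pvMem_srcs.mp hp
        have hbx := pvXf_bounds (n := (rows.length : Int)) (x := x) flip hx1 hx2
        simp only [pvTgt] at heq
        rw [pvCoord_eval _ flip turns _ _ hx1 hx2 hy1 hy2] at heq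
        simp only [h] at heq
        norm_num [Prod.mk.injEq] at heq
        have hxeq : pvXf (rows.length : Int) flip x = (rows.length : Int) - 1 - c := by omega
        rw [show y = (rows.length : Int) - 1 - r by omega, ← hxeq, pvXf_invol flip hx1 hx2])
      hz hr hc]
    rw [pvVal_eq _ _ _ (by omega) hxf.1]
    have hidx : (pvXf (rows.length : Int) flip ((rows.length : Int) - 1 - c)).toNat
        = if flip then rows.length - 1 - (rows.length - 1 - c) else rows.length - 1 - c := by
      unfold pvXf; cases flip <;> simp <;> omega
    rw [hidx, show ((rows.length : Int) - 1 - r).toNat = rows.length - 1 - r by omega]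
  · -- k = 3
    rw [show ((3:Int)).toNat = 3 from rfl, show (3:Nat) = 1 + (1 + 1) from rfl,
      Function.iterate_add_apply, Function.iterate_add_apply]
    simp only [Function.iterate_one]
    rw [pvGet_rotCW (pvShape_rotCW (pvShape_rotCW hm1)) hr hc,
      pvGet_rotCW (pvShape_rotCW hm1) (by omega) (by omega),
      pvGet_rotCW hm1 (by omega) (by omega),
      show rows.length - 1 - (rows.length - 1 - c) = c by omega,
      pvGet_m1 hpre (by omega) (by omega)]
    have hxf := pvXf_bounds (n := (rows.length : Int)) (x := (rows.length : Int) - 1 - r) flip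
      (by omega) (by omega)
    rw [pvGet_scatter
      (p0 := ((c : Int), pvXf (rows.length : Int) flip ((rows.length : Int) - 1 - r)))
      (pvSrcs (rows.length : Int)) _ (pvNodup_srcs _)
      (pvMem_srcs.mpr ⟨by omega, by omega, hxf.1, hxf.2⟩)
      (by
        simp only [pvTgt]
        rw [pvCoord_eval _ flip turns _ _ hxf.1 hxf.2 (by omega) (by omega)]
        simp only [pvXf_invol (n := (rows.length : Int)) (x := (rows.length : Int) - 1 - r) flip (by omega) (by omega), h]
        norm_num)
      (by
        rintro ⟨y, x⟩ hp heq
        obtain ⟨hy1, hy2, hx1, hx2⟩ := pvMem_srcs.mp hp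
        have hbx := pvXf_bounds (n := (rows.length : Int)) (x := x) flip hx1 hx2
        simp only [pvTgt] at heq
        rw [pvCoord_eval _ flip turns _ _ hx1 hx2 hy1 hy2] at heq
        simp only [h] at heq
        norm_num [Prod.mk.injEq] at heq
        have hxeq : pvXf (rows.length : Int) flip x = (rows.length : Int) - 1 - r := by omega
        rw [show y = (c : Int) by omega, ← hxeq, pvXf_invol flip hx1 hx2])
      hz hr hc]
    rw [pvVal_eq _ _ _ (by omega) hxf.1]
    have hidx : (pvXf (rows.length : Int) flip ((rows.length : Int) - 1 - r)).toNat
        = if flip then rows.length - 1 - (rows.length - 1 - r) else rows.length - 1 - r := by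
      unfold pvXf; cases flip <;> simp <;> omega
    rw [hidx, show ((c : Int)).toNat = c by omega]


theorem pvGet_eq_getElem {m : List (List Int)} {r c : Nat}
    (hr : r < m.length) (hc : c < m[r].length) : pvGet m r c = m[r][c] := by
  unfold pvGet
  rw [List.getD_eq_getElem?_getD (l := m), List.getElem?_eq_getElem hr, Option.getD_some,
    List.getD_eq_getElem?_getD, List.getElem?_eq_getElem hc, Option.getD_some]

-- ===== VERDICT (by name: the statement is the Claim_ definition above) =====
theorem FlipAndRotate_spec : Claim_equal_FlipAndRotate := by
  intro rows flip turns _hdom hpre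
  have hA := pvShape_A rows flip turns
  have hB := pvShape_B rows flip turns hpre
  show FlipAndRotate rows flip turns = FlipAndRotate_alt rows flip turns
  apply List.ext_getElem (by rw [hA.1, hB.1])
  intro i h1 h2
  apply List.ext_getElem (by rw [hA.2 i h1, hB.2 i h2])
  intro j hj1 hj2
  have hi : i < rows.length := by rw [← hA.1]; exact h1
  have hj : j < rows.length := by have := hA.2 i h1; omega
  have hpt := pvPointwise rows flip turns hpre i j hi hj
  rw [pvGet_eq_getElem h1 hj1, pvGet_eq_getElem h2 hj2] at hpt
  exact hpt
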